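-- pv_equiv track=rewrite | github.com/weijay0804/booflow | booflow/booflow.py | _tasks_order_to_graph
-- ===== SOURCE A (Python) =====
-- from collections import deque, defaultdict
-- from typing import List, Dict, Tuple
--
-- def _tasks_order_to_graph(
--     tasks_order: List[tuple]
-- ) -> Tuple[defaultdict, defaultdict, defaultdict]:
--     """將任務順序列表轉換成有向圖，前兩個回傳的值可以給 :meth:`Task._gen_tasks_queue` 當參數傳入
--
--     Args:
--         tasks_order (List[tuple]): 任務順序清單
--
--     Returns:
--         Tuple[defaultdict, defaultdict, defaultdict]: ( 有向圖資料結構 (`graph`), 入度字典 (`indegree`), 反向關聯有向圖 (`reverse_dependencies_graph`) )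
--     """
--     graph = defaultdict(set)
--     indegree = defaultdict(int)
--     # 加入反向關聯
--     reverse_dependencies = defaultdict(set)
--
--     for start, end in tasks_order:
--         if end not in graph[start]:
--             graph[start].add(end)
--             indegree[start]
--             indegree[end] += 1
--             reverse_dependencies[end].add(start)
--
--     return graph, indegree, reverse_dependencies
-- ===== SOURCE B (Python) =====
-- from collections import defaultdict
--
--
-- def _tasks_order_to_graph(tasks_order):
--     # Dedup the edge list once, build graph and reverse index in one grouped pass,
--     # then derive each indegree as the size of the node's reverse-dependency set.
--     unique = list(dict.fromkeys(tasks_order))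
--
--     graph = defaultdict(set)
--     reverse_dependencies = defaultdict(set)
--     for start, end in unique:
--         graph[start].add(end)
--         reverse_dependencies[end].add(start)
--
--     nodes = dict.fromkeys(x for edge in tasks_order for x in edge)
--     indegree = defaultdict(int)
--     for x in nodes:
--         indegree[x] = len(reverse_dependencies[x]) if x in reverse_dependencies else 0
--
--     return graph, indegree, reverse_dependencies
-- ===== Notes on version B (the rewrite author's own statement) =====
-- stated objective: alternative
-- what changed: Instead of one loop with a per-edge membership guard and in-loop indegree counters, B dedups the edge list once with dict.fromkeys, builds graph and reverse index in a plain grouped pass, and derives each node's indegree afterwards as the size of its reverse-dependency set.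
import Mathlib
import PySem

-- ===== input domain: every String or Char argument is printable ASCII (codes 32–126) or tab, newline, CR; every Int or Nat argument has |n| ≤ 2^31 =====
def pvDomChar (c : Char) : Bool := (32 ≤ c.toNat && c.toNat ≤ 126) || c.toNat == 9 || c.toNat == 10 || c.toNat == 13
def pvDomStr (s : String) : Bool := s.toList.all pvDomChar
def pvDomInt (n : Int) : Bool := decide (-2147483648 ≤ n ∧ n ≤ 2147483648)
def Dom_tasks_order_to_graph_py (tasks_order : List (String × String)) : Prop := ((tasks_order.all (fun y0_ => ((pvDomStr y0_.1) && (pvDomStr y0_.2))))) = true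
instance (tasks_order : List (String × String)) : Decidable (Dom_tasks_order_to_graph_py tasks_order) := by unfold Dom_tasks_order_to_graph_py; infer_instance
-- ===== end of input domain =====

-- B dedups the edge list once, builds graph and reverse index in a grouped pass, and
-- derives each indegree from the size of the node's reverse-dependency set (objective: alternative decomposition).

-- ===== PORT A =====
-- one loop iteration of A: touch graph[start], then (if the edge is new) record it in all three dicts
def pvStepA (st : PySem.Dict String (PySem.Set String) × PySem.Dict String Int × PySem.Dict String (PySem.Set String))
    (p : String × String) :
    PySem.Dict String (PySem.Set String) × PySem.Dict String Int × PySem.Dict String (PySem.Set String) :=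
  let g := st.1.setdefault p.1 []          -- graph[start] on a defaultdict inserts an empty set
  if PySem.Set.contains (g.getD p.1 []) p.2 then (g, st.2.1, st.2.2)
  else (g.insert p.1 (PySem.Set.add (g.getD p.1 []) p.2),
        (st.2.1.setdefault p.1 0).modify p.2 0 (· + 1),
        st.2.2.modify p.2 [] (fun s => PySem.Set.add s p.1))

def tasks_order_to_graph_py (tasks_order : List (String × String)) : (List (String × List String)) × (List (String × Int)) × (List (String × List String)) :=
  let st := tasks_order.foldl pvStepA (PySem.Dict.empty, PySem.Dict.empty, PySem.Dict.empty)
  (st.1.items, st.2.1.items, st.2.2.items)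

-- ===== PORT B =====
def pvGStep (d : PySem.Dict String (PySem.Set String)) (p : String × String) : PySem.Dict String (PySem.Set String) :=
  d.modify p.1 [] (fun s => PySem.Set.add s p.2)

def pvRStep (d : PySem.Dict String (PySem.Set String)) (p : String × String) : PySem.Dict String (PySem.Set String) :=
  d.modify p.2 [] (fun s => PySem.Set.add s p.1)

def tasks_order_to_graph_py_alt (tasks_order : List (String × String)) : (List (String × List String)) × (List (String × Int)) × (List (String × List String)) :=
  let unique := PySem.List.dedup tasks_order
  let g := unique.foldl pvGStep PySem.Dict.empty
  let r := unique.foldl pvRStep PySem.Dict.empty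
  let nodes := PySem.List.dedup (tasks_order.flatMap (fun p => [p.1, p.2]))
  let ind := nodes.foldl (fun d x => d.insert x (if r.contains x then PySem.Set.len (r.getD x []) else 0)) PySem.Dict.empty
  (g.items, ind.items, r.items)

-- ===== PRECONDITION & SPEC =====
def Spec_tasks_order_to_graph_py (tasks_order : List (String × String)) (out : (List (String × List String)) × (List (String × Int)) × (List (String × List String))) : Prop := out = tasks_order_to_graph_py_alt tasks_order
instance (tasks_order : List (String × String)) (out : (List (String × List String)) × (List (String × Int)) × (List (String × List String))) : Decidable (Spec_tasks_order_to_graph_py tasks_order out) := by unfold Spec_tasks_order_to_graph_py; infer_instance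

-- ===== CLAIM (what is proved, stated in full; the proofs are below) =====
def Claim_equal_tasks_order_to_graph_py : Prop := ∀ (tasks_order : List (String × String)), Dom_tasks_order_to_graph_py tasks_order → Spec_tasks_order_to_graph_py tasks_order (tasks_order_to_graph_py tasks_order)

-- ===== LEMMAS AND PROOFS =====

-- abbreviations for B's three dicts and the intermediate node list
def pvG (l : List (String × String)) : PySem.Dict String (PySem.Set String) :=
  (PySem.List.dedup l).foldl pvGStep PySem.Dict.empty
def pvR (l : List (String × String)) : PySem.Dict String (PySem.Set String) :=
  (PySem.List.dedup l).foldl pvRStep PySem.Dict.empty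
def pvN (l : List (String × String)) : List String :=
  PySem.List.dedup (l.flatMap (fun p => [p.1, p.2]))
def pvVal (l : List (String × String)) (x : String) : Int :=
  PySem.Set.len ((pvR l).getD x [])
def pvI (l : List (String × String)) : PySem.Dict String Int :=
  PySem.Dict.mk ((pvN l).map (fun x => (x, pvVal l x)))


-- generic characterisations of the modify/add folds shared by pvGStep and pvRStep
theorem pvGetDFold (key val : String × String → String) (l : List (String × String))
    (d : PySem.Dict String (PySem.Set String)) (c : String) :
    (l.foldl (fun d b => d.modify (key b) [] (fun s => PySem.Set.add s (val b))) d).getD c []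
      = PySem.Set.update (d.getD c []) ((l.filter (fun b => key b == c)).map val) := by
  induction l generalizing d with
  | nil => rfl
  | cons b t ih =>
    simp only [List.foldl_cons, List.filter_cons]
    rw [ih]
    by_cases h : key b = c
    · simp [h, PySem.Set.update]
    · have h2 : ¬ c = key b := fun hh => h hh.symm
      simp [h, h2, PySem.Dict.getD_modify]

theorem pvContainsFold (key val : String × String → String) (l : List (String × String))
    (d : PySem.Dict String (PySem.Set String)) (c : String) :
    (l.foldl (fun d b => d.modify (key b) [] (fun s => PySem.Set.add s (val b))) d).contains c
      = (d.contains c || l.any (fun b => key b == c)) := by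
  induction l generalizing d with
  | nil => simp
  | cons b t ih =>
    simp only [List.foldl_cons, List.any_cons]
    rw [ih]
    simp [PySem.Dict.contains_modify, BEq.comm]
    cases d.contains c <;> cases hb : (key b == c) <;> simp [Bool.or_comm]

theorem pvMemG (l : List (String × String)) (s e : String) :
    e ∈ (pvG l).getD s [] ↔ (s, e) ∈ l := by
  rw [show (pvG l).getD s [] = ((PySem.List.dedup l).foldl (fun d b => d.modify b.1 [] (fun t => PySem.Set.add t b.2)) PySem.Dict.empty).getD s [] from rfl,
    pvGetDFold (fun b => b.1) (fun b => b.2)]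
  simp [PySem.Set.mem_update, PySem.List.dedup_eq_ofList]

theorem pvMemR (l : List (String × String)) (s e : String) :
    s ∈ (pvR l).getD e [] ↔ (s, e) ∈ l := by
  rw [show (pvR l).getD e [] = ((PySem.List.dedup l).foldl (fun d b => d.modify b.2 [] (fun t => PySem.Set.add t b.1)) PySem.Dict.empty).getD e [] from rfl,
    pvGetDFold (fun b => b.2) (fun b => b.1)]
  simp [PySem.Set.mem_update, PySem.List.dedup_eq_ofList]

theorem pvContainsG (l : List (String × String)) (s : String) :
    (pvG l).contains s = true ↔ ∃ e, (s, e) ∈ l := by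
  rw [show (pvG l).contains s = ((PySem.List.dedup l).foldl (fun d b => d.modify b.1 [] (fun t => PySem.Set.add t b.2)) PySem.Dict.empty).contains s from rfl,
    pvContainsFold (fun b => b.1) (fun b => b.2)]
  simp [PySem.List.dedup_eq_ofList, List.any_eq_true]

theorem pvDedupSnoc {α : Type} [BEq α] [LawfulBEq α] (l : List α) (x : α) :
    PySem.List.dedup (l ++ [x]) = if x ∈ l then PySem.List.dedup l else PySem.List.dedup l ++ [x] := by
  simp only [PySem.List.dedup_eq_ofList, PySem.Set.ofList_eq_foldl, List.foldl_append,
    List.foldl_cons, List.foldl_nil, PySem.Set.add, PySem.Set.contains]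
  rw [← PySem.Set.ofList_eq_foldl]
  by_cases h : x ∈ l
  · simp [h, (PySem.Set.mem_ofList l x).mpr h]
  · have : x ∉ PySem.Set.ofList l := fun hx => h ((PySem.Set.mem_ofList l x).mp hx)
    simp [h, this]

theorem pvGSnocNew (l : List (String × String)) (p : String × String) (h : p ∉ l) :
    pvG (l ++ [p]) = pvGStep (pvG l) p := by
  rw [pvG, pvDedupSnoc, if_neg h, List.foldl_append]; rfl

theorem pvRSnocNew (l : List (String × String)) (p : String × String) (h : p ∉ l) :
    pvR (l ++ [p]) = pvRStep (pvR l) p := by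
  rw [pvR, pvDedupSnoc, if_neg h, List.foldl_append]; rfl

theorem pvGSnocDup (l : List (String × String)) (p : String × String) (h : p ∈ l) :
    pvG (l ++ [p]) = pvG l := by
  rw [pvG, pvDedupSnoc, if_pos h]; rfl

theorem pvRSnocDup (l : List (String × String)) (p : String × String) (h : p ∈ l) :
    pvR (l ++ [p]) = pvR l := by
  rw [pvR, pvDedupSnoc, if_pos h]; rfl

theorem pvFindMap {ν : Type} (N : List String) (f : String → ν) (y : String) :
    List.find? (fun p => p.1 == y) (N.map (fun x => (x, f x))) = if y ∈ N then some (y, f y) else none := by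
  induction N with
  | nil => simp
  | cons a t ih =>
    by_cases h : a = y
    · simp [h]
    · simp [h, ih, Ne.symm h]

theorem pvContainsMap {ν : Type} (N : List String) (f : String → ν) (y : String) :
    (PySem.Dict.mk (N.map (fun x => (x, f x)))).contains y = decide (y ∈ N) := by
  induction N with
  | nil => simp [PySem.Dict.contains]
  | cons a t ih =>
    by_cases h : a = y
    · simp [PySem.Dict.contains, h]
    · simp only [PySem.Dict.contains, List.map_cons, List.any_cons] at ih ⊢
      simp [h, ih, Ne.symm h]

theorem pvLenAdd (s : PySem.Set String) (x : String) (h : x ∉ s) :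
    PySem.Set.len (PySem.Set.add s x) = PySem.Set.len s + 1 := by
  simp [PySem.Set.add, PySem.Set.contains, PySem.Set.len, h]

theorem pvGetDSetdefault (d : PySem.Dict String (PySem.Set String)) (k : String) :
    (d.setdefault k []).getD k [] = d.getD k [] := by
  by_cases hc : d.contains k = true
  · simp [PySem.Dict.setdefault, hc]
  · have hno : ∀ q ∈ d.items, (q.1 == k) = false := by
      rw [Bool.not_eq_true, PySem.Dict.contains, List.any_eq_false] at hc
      intro q hq
      cases hbe : (q.1 == k) with
      | false => rfl
      | true => exact absurd hbe (hc q hq)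
    have hfind : List.find? (fun p => p.1 == k) d.items = none :=
      List.find?_eq_none.mpr (fun x hx => by simp [hno x hx])
    simp [PySem.Dict.setdefault, hc, PySem.Dict.getD, PySem.Dict.get?, List.find?_append, hfind]

-- A's "touch graph[start], then insert the enlarged set" equals B's single modify, on a new edge
theorem pvGNewStep (d : PySem.Dict String (PySem.Set String)) (s e : String) :
    ((d.setdefault s []).insert s (PySem.Set.add ((d.setdefault s []).getD s []) e))
      = pvGStep d (s, e) := by
  rw [pvGetDSetdefault]
  by_cases hc : d.contains s = true
  · rw [PySem.Dict.setdefault, if_pos hc]; rfl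
  · have hcf : d.contains s = false := by simpa using hc
    have hno : ∀ q ∈ d.items, (q.1 == s) = false := by
      rw [PySem.Dict.contains, List.any_eq_false] at hcf
      intro q hq
      cases hbe : (q.1 == s) with
      | false => rfl
      | true => exact absurd hbe (hcf q hq)
    have hd0 : d.getD s [] = [] := PySem.Dict.getD_of_not_contains d [] hcf
    have hc2 : (PySem.Dict.mk (d.items ++ [(s, ([] : PySem.Set String))])).contains s = true := by
      simp [PySem.Dict.contains]
    rw [PySem.Dict.setdefault, if_neg hc, hd0]
    show PySem.Dict.insert (PySem.Dict.mk (d.items ++ [(s, [])])) s (PySem.Set.add [] e) = _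
    rw [PySem.Dict.insert, if_pos hc2, pvGStep, PySem.Dict.modify, hd0, PySem.Dict.insert, if_neg (by simp [hcf])]
    congr 1
    rw [List.map_append]
    congr 1
    · calc List.map (fun p => if (p.1 == s) = true then (s, PySem.Set.add [] e) else p) d.items
          = List.map id d.items := List.map_congr_left (fun q hq => by simp [hno q hq])
        _ = d.items := List.map_id _
    · simp

theorem pvValFresh (l : List (String × String)) (x : String)
    (h : x ∉ l.flatMap (fun p => [p.1, p.2])) : pvVal l x = 0 := by
  have hfil : (PySem.List.dedup l).filter (fun b => b.2 == x) = [] := by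
    rw [List.filter_eq_nil_iff]
    intro b hb
    have hbl : b ∈ l := (PySem.Set.mem_ofList l b).mp (by rwa [PySem.List.dedup_eq_ofList] at hb)
    simp only [beq_iff_eq]
    intro hbe
    exact h (List.mem_flatMap.mpr ⟨b, hbl, by simp [hbe]⟩)
  rw [pvVal, show (pvR l).getD x [] = ((PySem.List.dedup l).foldl (fun d b => d.modify b.2 [] (fun t => PySem.Set.add t b.1)) PySem.Dict.empty).getD x [] from rfl,
    pvGetDFold (fun b => b.2) (fun b => b.1), hfil]
  simp [PySem.Set.update, PySem.Set.len]

theorem pvValSnoc (l : List (String × String)) (s e x : String) (h : (s, e) ∉ l) :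
    pvVal (l ++ [(s, e)]) x = if x = e then pvVal l e + 1 else pvVal l x := by
  rw [pvVal, pvRSnocNew l (s, e) h,
    show pvRStep (pvR l) (s, e) = (pvR l).modify e [] (fun t => PySem.Set.add t s) from rfl,
    PySem.Dict.getD_modify]
  by_cases hx : x = e
  · rw [if_pos hx, if_pos hx]
    have hs : s ∉ (pvR l).getD e [] := fun hm => h ((pvMemR l s e).mp hm)
    rw [pvLenAdd _ _ hs]; rfl
  · rw [if_neg hx, if_neg hx]; rfl

theorem pvINew (l : List (String × String)) (s e : String) (h : (s, e) ∉ l) :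
    ((pvI l).setdefault s 0).modify e 0 (· + 1) = pvI (l ++ [(s, e)]) := by
  have hval : ∀ x, pvVal (l ++ [(s, e)]) x = if x = e then pvVal l e + 1 else pvVal l x :=
    fun x => pvValSnoc l s e x h
  have hmemN : ∀ x, x ∈ pvN l ↔ x ∈ l.flatMap (fun p => [p.1, p.2]) := fun x => by
    rw [pvN, PySem.List.dedup_eq_ofList]; exact PySem.Set.mem_ofList _ _
  have hflat : (l ++ [(s, e)]).flatMap (fun p => [p.1, p.2])
      = (l.flatMap (fun p => [p.1, p.2]) ++ [s]) ++ [e] := by simp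
  by_cases hsF : s ∈ l.flatMap (fun p => [p.1, p.2])
  · have hsN : s ∈ pvN l := (hmemN s).mpr hsF
    have hcs : (pvI l).contains s = true := by rw [pvI, pvContainsMap]; simpa using hsN
    rw [PySem.Dict.setdefault, if_pos hcs]
    by_cases heF : e ∈ l.flatMap (fun p => [p.1, p.2])
    · -- both endpoints already seen: key list unchanged, e's entry bumped
      have heN : e ∈ pvN l := (hmemN e).mpr heF
      have hN' : pvN (l ++ [(s, e)]) = pvN l := by
        rw [pvN, hflat, pvDedupSnoc, if_pos (List.mem_append.mpr (Or.inl heF)),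
          pvDedupSnoc, if_pos hsF]; rfl
      have hce : (pvI l).contains e = true := by rw [pvI, pvContainsMap]; simpa using heN
      have hget : (pvI l).getD e 0 = pvVal l e := by
        rw [pvI, PySem.Dict.getD, PySem.Dict.get?, PySem.Dict.items, pvFindMap, if_pos heN]; rfl
      rw [PySem.Dict.modify, hget, PySem.Dict.insert, if_pos hce, pvI, pvI, hN']
      congr 1
      rw [PySem.Dict.items, List.map_map]
      apply List.map_congr_left
      intro x hx
      by_cases hx2 : x = e
      · simp [hx2, hval e]
      · simp [hx2, hval x]
    · -- e is a brand-new node: its entry (e, 1) is appended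
      have heN : e ∉ pvN l := fun hh => heF ((hmemN e).mp hh)
      have hes : ¬ e = s := fun hh => heF (hh ▸ hsF)
      have hN' : pvN (l ++ [(s, e)]) = pvN l ++ [e] := by
        rw [pvN, hflat, pvDedupSnoc, if_neg (by simp [heF, hes]), pvDedupSnoc, if_pos hsF]; rfl
      have hce : (pvI l).contains e = false := by
        rw [pvI, pvContainsMap]; simpa using heN
      have hget : (pvI l).getD e 0 = 0 := PySem.Dict.getD_of_not_contains _ _ hce
      rw [PySem.Dict.modify, hget, PySem.Dict.insert, if_neg (by simp [hce]), pvI, pvI, hN']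
      congr 1
      rw [PySem.Dict.items, List.map_append]
      congr 1
      · apply List.map_congr_left
        intro x hx
        have hx2 : ¬ x = e := fun hh => heN (hh ▸ hx)
        simp [hval x, hx2]
      · simp [hval e, pvValFresh l e heF]
  · have hsN : s ∉ pvN l := fun hh => hsF ((hmemN s).mp hh)
    have hcs : (pvI l).contains s = false := by rw [pvI, pvContainsMap]; simpa using hsN
    have hanyM : ∀ y : String, ((pvN l).map (fun x => (x, pvVal l x))).any (fun p => p.1 == y)
        = decide (y ∈ pvN l) := fun y => pvContainsMap (pvN l) (pvVal l) y
    rw [PySem.Dict.setdefault, if_neg (by simp [hcs]), pvI]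
    by_cases heF : e ∈ l.flatMap (fun p => [p.1, p.2])
    · -- s is brand new, e already seen: append (s, 0), bump e's entry
      have heN : e ∈ pvN l := (hmemN e).mpr heF
      have hse : ¬ s = e := fun hh => hsF (hh ▸ heF)
      have hN' : pvN (l ++ [(s, e)]) = pvN l ++ [s] := by
        rw [pvN, hflat, pvDedupSnoc, if_pos (List.mem_append.mpr (Or.inl heF)),
          pvDedupSnoc, if_neg hsF]; rfl
      have hce : (PySem.Dict.mk (((pvN l).map (fun x => (x, pvVal l x))) ++ [(s, (0 : Int))])).contains e = true := by
        rw [PySem.Dict.contains, PySem.Dict.items, List.any_append, hanyM e]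
        simp [heN]
      have hget : (PySem.Dict.mk (((pvN l).map (fun x => (x, pvVal l x))) ++ [(s, (0 : Int))])).getD e 0 = pvVal l e := by
        rw [PySem.Dict.getD, PySem.Dict.get?, PySem.Dict.items, List.find?_append, pvFindMap, if_pos heN]; rfl
      rw [PySem.Dict.items, PySem.Dict.modify, hget, PySem.Dict.insert, if_pos hce, pvI, hN']
      congr 1
      rw [PySem.Dict.items, List.map_append, List.map_append, List.map_map]
      congr 1
      · apply List.map_congr_left
        intro x hx
        by_cases hx2 : x = e
        · simp [hx2, hval e]
        · simp [hx2, hval x]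
      · simp [hse, hval s, pvValFresh l s hsF]
    · have heN : e ∉ pvN l := fun hh => heF ((hmemN e).mp hh)
      by_cases hse : s = e
      · -- brand-new self-loop: single appended entry (s, 1)
        subst hse
        have hN' : pvN (l ++ [(s, s)]) = pvN l ++ [s] := by
          rw [pvN, hflat, pvDedupSnoc, if_pos (List.mem_append.mpr (Or.inr (by simp))),
            pvDedupSnoc, if_neg hsF]; rfl
        have hcs2 : (PySem.Dict.mk (((pvN l).map (fun x => (x, pvVal l x))) ++ [(s, (0 : Int))])).contains s = true := by
          rw [PySem.Dict.contains, PySem.Dict.items, List.any_append]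
          simp
        have hget : (PySem.Dict.mk (((pvN l).map (fun x => (x, pvVal l x))) ++ [(s, (0 : Int))])).getD s 0 = 0 := by
          rw [PySem.Dict.getD, PySem.Dict.get?, PySem.Dict.items, List.find?_append, pvFindMap, if_neg hsN]; simp
        rw [PySem.Dict.items, PySem.Dict.modify, hget, PySem.Dict.insert, if_pos hcs2, pvI, hN']
        congr 1
        rw [PySem.Dict.items, List.map_append, List.map_append, List.map_map]
        congr 1
        · apply List.map_congr_left
          intro x hx
          have hx2 : ¬ x = s := fun hh => hsN (hh ▸ hx)
          simp [hval x, hx2]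
        · simp [hval s, pvValFresh l s hsF]
      · -- two brand-new nodes: append (s, 0) then (e, 1)
        have hN' : pvN (l ++ [(s, e)]) = (pvN l ++ [s]) ++ [e] := by
          rw [pvN, hflat, pvDedupSnoc, if_neg (by simp [heF]; exact fun hh => hse hh.symm),
            pvDedupSnoc, if_neg hsF]; rfl
        have hce : (PySem.Dict.mk (((pvN l).map (fun x => (x, pvVal l x))) ++ [(s, (0 : Int))])).contains e = false := by
          rw [PySem.Dict.contains, PySem.Dict.items, List.any_append, hanyM e]
          simp [heN, hse]
        have hget : (PySem.Dict.mk (((pvN l).map (fun x => (x, pvVal l x))) ++ [(s, (0 : Int))])).getD e 0 = 0 :=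
          PySem.Dict.getD_of_not_contains _ _ hce
        rw [PySem.Dict.items, PySem.Dict.modify, hget, PySem.Dict.insert, if_neg (by simp [hce]), pvI, hN']
        congr 1
        rw [PySem.Dict.items, List.map_append, List.map_append]
        congr 1
        · show List.map (fun x => (x, pvVal l x)) (pvN l) ++ [(s, (0 : Int))]
            = List.map (fun x => (x, pvVal (l ++ [(s, e)]) x)) (pvN l) ++ List.map (fun x => (x, pvVal (l ++ [(s, e)]) x)) [s]
          congr 1
          · apply List.map_congr_left
            intro x hx
            have hx2 : ¬ x = e := fun hh => heN (hh ▸ hx)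
            simp [hval x, hx2]
          · simp [hval s, hse, pvValFresh l s hsF]
        · simp [hval e, pvValFresh l e heF]

theorem pvISnocDup (l : List (String × String)) (s e : String) (h : (s, e) ∈ l) :
    pvI (l ++ [(s, e)]) = pvI l := by
  have hs : s ∈ l.flatMap (fun p => [p.1, p.2]) := List.mem_flatMap.mpr ⟨(s, e), h, by simp⟩
  have he : e ∈ l.flatMap (fun p => [p.1, p.2]) := List.mem_flatMap.mpr ⟨(s, e), h, by simp⟩
  have hN : pvN (l ++ [(s, e)]) = pvN l := by
    rw [pvN, show (l ++ [(s, e)]).flatMap (fun p => [p.1, p.2]) = (l.flatMap (fun p => [p.1, p.2]) ++ [s]) ++ [e] from by simp,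
      pvDedupSnoc, if_pos (List.mem_append.mpr (Or.inl he)), pvDedupSnoc, if_pos hs]
    rfl
  rw [pvI, pvI, hN]
  congr 1
  apply List.map_congr_left
  intro x hx
  rw [pvVal, pvVal, pvRSnocDup l _ h]

theorem pvMain (l : List (String × String)) :
    l.foldl pvStepA (PySem.Dict.empty, PySem.Dict.empty, PySem.Dict.empty) = (pvG l, pvI l, pvR l) := by
  induction l using List.reverseRecOn with
  | nil => rfl
  | append_singleton l p ih =>
    obtain ⟨s, e⟩ := p
    rw [List.foldl_append, List.foldl_cons, List.foldl_nil, ih]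
    by_cases hmem : (s, e) ∈ l
    · have hcs : (pvG l).contains s = true := (pvContainsG l s).mpr ⟨e, hmem⟩
      have hsd : (pvG l).setdefault s [] = pvG l := by rw [PySem.Dict.setdefault, if_pos hcs]
      have hcond : PySem.Set.contains (((pvG l).setdefault s []).getD s []) e = true := by
        rw [pvGetDSetdefault]
        simp [PySem.Set.contains, (pvMemG l s e).mpr hmem]
      show (if PySem.Set.contains (((pvG l).setdefault s []).getD s []) e then _ else _) = _
      rw [hcond, if_pos rfl, hsd, pvGSnocDup l _ hmem, pvRSnocDup l _ hmem, pvISnocDup l s e hmem]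
    · have hcond : PySem.Set.contains (((pvG l).setdefault s []).getD s []) e = false := by
        rw [pvGetDSetdefault]
        simp only [PySem.Set.contains, List.contains_eq_mem, decide_eq_false_iff_not]
        exact fun hm => hmem ((pvMemG l s e).mp hm)
      show (if PySem.Set.contains (((pvG l).setdefault s []).getD s []) e then _ else _) = _
      rw [hcond, if_neg (by simp), pvGSnocNew l _ hmem, pvRSnocNew l _ hmem,
        ← pvINew l s e hmem, ← pvGNewStep (pvG l) s e]
      rfl

-- ===== VERDICT (by name: the statement is the Claim_ definition above) =====
theorem tasks_order_to_graph_py_spec : Claim_equal_tasks_order_to_graph_py := by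
  intro l _
  show tasks_order_to_graph_py l = tasks_order_to_graph_py_alt l
  have hnodup : (pvN l).Nodup := by
    rw [pvN, PySem.List.dedup_eq_ofList]; exact PySem.Set.nodup_ofList _
  have hitems := PySem.Dict.items_foldl_insert_fresh (pvN l) (fun x => x)
    (fun x => if (pvR l).contains x then PySem.Set.len ((pvR l).getD x []) else 0)
    PySem.Dict.empty (fun x _ => rfl) (by simpa using hnodup)
  have hind : ((pvN l).foldl (fun d x => d.insert x (if (pvR l).contains x then PySem.Set.len ((pvR l).getD x []) else 0)) PySem.Dict.empty).items
      = (pvN l).map (fun x => (x, if (pvR l).contains x then PySem.Set.len ((pvR l).getD x []) else 0)) := hitems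
  have hmapeq : (pvN l).map (fun x => (x, if (pvR l).contains x then PySem.Set.len ((pvR l).getD x []) else 0))
      = (pvN l).map (fun x => (x, pvVal l x)) := by
    apply List.map_congr_left
    intro x hx
    by_cases hc : (pvR l).contains x = true
    · simp [pvVal, hc]
    · have hcf : (pvR l).contains x = false := by simpa using hc
      rw [pvVal, PySem.Dict.getD_of_not_contains _ _ hcf]
      simp [hcf, PySem.Set.len]
  have hA : tasks_order_to_graph_py l = ((pvG l).items, (pvI l).items, (pvR l).items) := by
    rw [tasks_order_to_graph_py]
    show ((l.foldl pvStepA (PySem.Dict.empty, PySem.Dict.empty, PySem.Dict.empty)).1.items,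
      (l.foldl pvStepA (PySem.Dict.empty, PySem.Dict.empty, PySem.Dict.empty)).2.1.items,
      (l.foldl pvStepA (PySem.Dict.empty, PySem.Dict.empty, PySem.Dict.empty)).2.2.items) = _
    rw [pvMain l]
  rw [hA]
  show _ = ((pvG l).items,
    ((pvN l).foldl (fun d x => d.insert x (if (pvR l).contains x then PySem.Set.len ((pvR l).getD x []) else 0)) PySem.Dict.empty).items,
    (pvR l).items)
  rw [hind, hmapeq]
  rfl
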